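-- pv_equiv track=rewrite | github.com/holoviz/panel | panel/pipeline.py | get_breadths
-- ===== SOURCE A (Python) =====
-- from collections import OrderedDict, defaultdict
--
-- def get_breadths(node, graph, depth=0, breadths=None):
--     if breadths is None:
--         breadths = defaultdict(list)
--         breadths[depth].append(node)
--     for sub in graph.get(node, []):
--         if sub not in breadths[depth+1]:
--             breadths[depth+1].append(sub)
--         get_breadths(sub, graph, depth+1, breadths)
--     return breadths
-- ===== SOURCE B (Python) =====
-- from collections import defaultdict
--
--
-- def get_breadths(node, graph, depth=0, breadths=None):
--     if breadths is None:
--         breadths = defaultdict(list)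
--         breadths[depth].append(node)
--     seen = set()
--
--     def visit(n, d):
--         for sub in graph.get(n, []):
--             if (sub, d + 1) not in seen:
--                 seen.add((sub, d + 1))
--                 breadths[d + 1].append(sub)
--                 visit(sub, d + 1)
--
--     visit(node, depth)
--     return breadths
-- ===== Notes on version B (the rewrite author's own statement) =====
-- stated objective: alternative
-- what changed: B keeps a set of already-visited (node, depth) pairs and recurses into each pair only once, instead of A's re-descending into a node every time any path reaches it at that depth.
-- outside the precondition, e.g. on get_breadths('a', {'a': ['b']}, 0, {1: ['b']}): A returns {1: ['b']}, B returns {1: ['b', 'b']}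
import Mathlib
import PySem

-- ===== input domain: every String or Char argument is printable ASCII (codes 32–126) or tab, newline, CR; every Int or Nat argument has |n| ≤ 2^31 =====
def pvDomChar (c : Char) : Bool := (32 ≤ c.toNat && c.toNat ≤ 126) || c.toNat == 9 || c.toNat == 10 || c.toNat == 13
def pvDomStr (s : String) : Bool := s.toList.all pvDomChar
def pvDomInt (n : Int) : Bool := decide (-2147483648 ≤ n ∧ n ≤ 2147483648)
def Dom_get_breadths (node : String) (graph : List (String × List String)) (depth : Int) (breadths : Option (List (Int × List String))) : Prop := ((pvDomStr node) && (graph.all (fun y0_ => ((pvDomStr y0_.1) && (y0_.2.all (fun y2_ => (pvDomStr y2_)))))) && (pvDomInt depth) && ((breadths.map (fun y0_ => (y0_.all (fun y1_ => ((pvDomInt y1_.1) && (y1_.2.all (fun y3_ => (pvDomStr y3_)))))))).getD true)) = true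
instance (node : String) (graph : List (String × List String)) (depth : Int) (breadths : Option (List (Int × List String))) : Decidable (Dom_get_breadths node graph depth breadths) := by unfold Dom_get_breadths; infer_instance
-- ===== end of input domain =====

-- B replaces A's re-recursion into already-placed nodes by a seen-set of (node, depth) pairs,
-- visiting each pair once (objective: alternative, memoized traversal).

-- ===== PORT A =====
-- graph.get(n, [])  (shared primitive lookup, used verbatim by both Pythons)
def pvSuccs (graph : List (String × List String)) (n : String) : List String :=
  PySem.Dict.getD (PySem.Dict.mk graph) n []

-- `if sub not in breadths[l]: breadths[l].append(sub)` on a defaultdict(list)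
def pvAppendA (b : PySem.Dict Int (List String)) (l : Int) (s : String) : PySem.Dict Int (List String) :=
  if s ∈ PySem.Dict.getD b l [] then b else PySem.Dict.insert b l (PySem.Dict.getD b l [] ++ [s])

-- A's body after the init: `for sub in graph.get(node, []): if …: append; get_breadths(sub, …)`;
-- the recursive call is that same loop over graph.get(sub, []) one level deeper.  Fuel makes the
-- recursion total in Lean; Pre_ (no cycle reachable from node) guarantees it is never exhausted.
def pvRunA (graph : List (String × List String)) : Nat → List String → Int → PySem.Dict Int (List String) → PySem.Dict Int (List String)
  | 0, _, _, b => b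
  | _ + 1, [], _, b => b
  | f + 1, sub :: rest, d, b =>
      pvRunA graph (f + 1) rest d
        (pvRunA graph f (pvSuccs graph sub) (d + 1) (pvAppendA b (d + 1) sub))
termination_by f l => (f, l.length)

def get_breadths (node : String) (graph : List (String × List String)) (depth : Int) (breadths : Option (List (Int × List String))) : List (Int × List String) :=
  match breadths with
  | none =>
      (pvRunA graph (graph.length + 1) (pvSuccs graph node) depth
        (PySem.Dict.insert PySem.Dict.empty depth [node])).items
  | some b =>
      (pvRunA graph (graph.length + 1) (pvSuccs graph node) depth (PySem.Dict.mk b)).items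

-- ===== PORT B =====
-- B's `visit(n, d)`: loop over graph.get(n, []), skip (sub, d+1) pairs already seen, otherwise
-- record the pair, append sub to breadths[d+1] and recurse (same fuel discipline as A's port).
def pvRunB (graph : List (String × List String)) : Nat → List String → Int → PySem.Dict Int (List String) × PySem.Set (String × Int) → PySem.Dict Int (List String) × PySem.Set (String × Int)
  | 0, _, _, st => st
  | _ + 1, [], _, st => st
  | f + 1, sub :: rest, d, st =>
      if PySem.Set.contains st.2 (sub, d + 1) then
        pvRunB graph (f + 1) rest d st
      else
        pvRunB graph (f + 1) rest d
          (pvRunB graph f (pvSuccs graph sub) (d + 1)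
            (PySem.Dict.insert st.1 (d + 1) (PySem.Dict.getD st.1 (d + 1) [] ++ [sub]),
             PySem.Set.add st.2 (sub, d + 1)))
termination_by f l => (f, l.length)

def get_breadths_alt (node : String) (graph : List (String × List String)) (depth : Int) (breadths : Option (List (Int × List String))) : List (Int × List String) :=
  let b0 := match breadths with
    | none => PySem.Dict.insert PySem.Dict.empty depth [node]
    | some b => PySem.Dict.mk b
  (pvRunB graph (graph.length + 1) (pvSuccs graph node) depth (b0, PySem.Set.empty)).1.items

-- ===== PRECONDITION & SPEC =====
-- one expansion step of reachability: keep S, add every successor, dedup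
def pvReachStep (graph : List (String × List String)) (S : List String) : List String :=
  (S ++ S.flatMap (fun x => pvSuccs graph x)).dedup

-- all nodes reachable from S (graph.length+1 expansion steps reach a fixpoint)
def pvReach (graph : List (String × List String)) (S : List String) : List String :=
  (pvReachStep graph)^[graph.length + 1] S

-- Pre_ excludes (i) graphs with a cycle reachable from node, on which Python A recurses forever
-- (RecursionError), and (ii) an explicitly passed breadths dict when node has successors: there A
-- indexes a plain dict (KeyError whenever a depth key is missing) and, where the keys do exist, its
-- skip-the-append-but-still-recurse treatment of pre-populated levels is an accident of A's
-- defaultdict reuse that B does not reproduce.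
def Pre_get_breadths (node : String) (graph : List (String × List String)) (depth : Int) (breadths : Option (List (Int × List String))) : Prop :=
  (breadths = none ∨ pvSuccs graph node = []) ∧
  (∀ x ∈ pvReach graph [node], x ∉ pvReach graph (pvSuccs graph x))
instance (node : String) (graph : List (String × List String)) (depth : Int) (breadths : Option (List (Int × List String))) : Decidable (Pre_get_breadths node graph depth breadths) := by unfold Pre_get_breadths; infer_instance

def pvWitness_get_breadths : String × (List (String × List String)) × Int × (Option (List (Int × List String))) :=
  ("a", [("a", ["b", "c"]), ("b", ["c"])], 0, none)

def Spec_get_breadths (node : String) (graph : List (String × List String)) (depth : Int) (breadths : Option (List (Int × List String))) (out : List (Int × List String)) : Prop := out = get_breadths_alt node graph depth breadths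
instance (node : String) (graph : List (String × List String)) (depth : Int) (breadths : Option (List (Int × List String))) (out : List (Int × List String)) : Decidable (Spec_get_breadths node graph depth breadths out) := by unfold Spec_get_breadths; infer_instance

-- ===== CLAIM (what is proved, stated in full; the proofs are below) =====
def Claim_equal_get_breadths : Prop := ∀ (node : String) (graph : List (String × List String)) (depth : Int) (breadths : Option (List (Int × List String))), Dom_get_breadths node graph depth breadths → Pre_get_breadths node graph depth breadths → Spec_get_breadths node graph depth breadths (get_breadths node graph depth breadths)

-- ===== LEMMAS AND PROOFS =====

-- the list stored at level l (defaultdict(list) read)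
def lvl (b : PySem.Dict Int (List String)) (l : Int) : List String := PySem.Dict.getD b l []

-- "x, placed at depth d, is fully processed for f further levels below d"
def ClosedN (graph : List (String × List String)) : Nat → String → Int → PySem.Dict Int (List String) → Prop
  | 0, _, _, _ => True
  | f + 1, x, d, b => ∀ s ∈ pvSuccs graph x, s ∈ lvl b (d + 1) ∧ ClosedN graph f s (d + 1) b

-- invariant tying B's seen set to the level lists during the sibling loop at depth d, fuel f + 1:
-- below depth d, membership in seen coincides with membership in the level list, and every placed
-- node is already fully processed for the fuel its level will be given
def InvA (graph : List (String × List String)) (f : Nat) (d : Int) (b : PySem.Dict Int (List String)) (seen : PySem.Set (String × Int)) : Prop :=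
  ∀ l : Int, d < l → ∀ y : String,
    (((y, l) ∈ seen) ↔ y ∈ lvl b l) ∧
    (y ∈ lvl b l → ClosedN graph (f - (l - (d + 1)).toNat) y l b)

theorem lvl_appendA_self (b : PySem.Dict Int (List String)) (l : Int) (s : String) :
    lvl (pvAppendA b l s) l = if s ∈ lvl b l then lvl b l else lvl b l ++ [s] := by
  unfold lvl pvAppendA
  split_ifs with h
  · rfl
  · simp

theorem lvl_appendA_ne (b : PySem.Dict Int (List String)) (l l' : Int) (s : String) (h : l' ≠ l) :
    lvl (pvAppendA b l s) l' = lvl b l' := by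
  unfold lvl pvAppendA
  split_ifs with h2
  · rfl
  · simp [PySem.Dict.getD_insert, h]

theorem mem_lvl_appendA (b : PySem.Dict Int (List String)) (l l' : Int) (s y : String)
    (h : y ∈ lvl b l') : y ∈ lvl (pvAppendA b l s) l' := by
  by_cases hl : l' = l
  · subst hl; rw [lvl_appendA_self]; split_ifs with h2
    · exact h
    · exact List.mem_append_left _ h
  · rw [lvl_appendA_ne _ _ _ _ hl]; exact h

theorem runA_zero (g : List (String × List String)) (xs : List String) (d : Int) (b : PySem.Dict Int (List String)) :
    pvRunA g 0 xs d b = b := by simp [pvRunA]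

theorem runA_succ_nil (g : List (String × List String)) (f : Nat) (d : Int) (b : PySem.Dict Int (List String)) :
    pvRunA g (f + 1) [] d b = b := by simp [pvRunA]

theorem runA_succ_cons (g : List (String × List String)) (f : Nat) (sub : String) (rest : List String) (d : Int) (b : PySem.Dict Int (List String)) :
    pvRunA g (f + 1) (sub :: rest) d b
      = pvRunA g (f + 1) rest d (pvRunA g f (pvSuccs g sub) (d + 1) (pvAppendA b (d + 1) sub)) := by
  simp [pvRunA]

theorem grow_runA (g : List (String × List String)) :
    ∀ (f : Nat) (xs : List String) (d : Int) (b : PySem.Dict Int (List String)) (l : Int) (y : String),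
      y ∈ lvl b l → y ∈ lvl (pvRunA g f xs d b) l := by
  intro f xs d b
  fun_induction pvRunA g f xs d b with
  | case1 => intro l y h; exact h
  | case2 => intro l y h; exact h
  | case3 f sub rest d b ih1 ih2 => intro l y h; exact ih2 _ _ (ih1 _ _ (mem_lvl_appendA _ _ _ _ _ h))

theorem levels_runA (g : List (String × List String)) :
    ∀ (f : Nat) (xs : List String) (d : Int) (b : PySem.Dict Int (List String)) (l : Int),
      l ≤ d → lvl (pvRunA g f xs d b) l = lvl b l := by
  intro f xs d b
  fun_induction pvRunA g f xs d b with
  | case1 => intro l h; rfl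
  | case2 => intro l h; rfl
  | case3 f sub rest d b ih1 ih2 =>
    intro l h
    rw [ih2 _ h, ih1 _ (by omega)]
    exact (by rw [show lvl (pvAppendA b (d+1) sub) l = lvl b l from by
      unfold lvl pvAppendA; split_ifs with h2; rfl; simp [PySem.Dict.getD_insert]; omega])

theorem ClosedN_mono (g : List (String × List String)) :
    ∀ (f : Nat) (x : String) (d : Int) (b b' : PySem.Dict Int (List String)),
      (∀ l y, y ∈ lvl b l → y ∈ lvl b' l) → ClosedN g f x d b → ClosedN g f x d b' := by
  intro f
  induction f with
  | zero => intro x d b b' hg hc; trivial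
  | succ f ih =>
    intro x d b b' hg hc s hs
    obtain ⟨h1, h2⟩ := hc s hs
    exact ⟨hg _ _ h1, ih _ _ _ _ hg h2⟩

theorem runA_nop (g : List (String × List String)) :
    ∀ (f : Nat) (xs : List String) (d : Int) (b : PySem.Dict Int (List String)),
      (∀ s ∈ xs, s ∈ lvl b (d + 1) ∧ ClosedN g f s (d + 1) b) →
      pvRunA g (f + 1) xs d b = b := by
  intro f
  induction f with
  | zero =>
    intro xs
    induction xs with
    | nil => intro d b h; exact runA_succ_nil g 0 d b
    | cons sub rest ih =>
      intro d b h
      obtain ⟨h1, -⟩ := h sub List.mem_cons_self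
      have hpush : pvAppendA b (d + 1) sub = b := by unfold pvAppendA lvl at *; simp [h1]
      rw [runA_succ_cons, hpush, runA_zero]
      exact ih d b (fun s hs => h s (List.mem_cons_of_mem _ hs))
  | succ f ihf =>
    intro xs
    induction xs with
    | nil => intro d b h; exact runA_succ_nil g _ d b
    | cons sub rest ih =>
      intro d b h
      obtain ⟨h1, h2⟩ := h sub List.mem_cons_self
      have hpush : pvAppendA b (d + 1) sub = b := by unfold pvAppendA lvl at *; simp [h1]
      rw [runA_succ_cons, hpush, ihf (pvSuccs g sub) (d + 1) b h2]
      exact ih d b (fun s hs => h s (List.mem_cons_of_mem _ hs))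

theorem mem_self_appendA (b : PySem.Dict Int (List String)) (l : Int) (s : String) :
    s ∈ lvl (pvAppendA b l s) l := by
  rw [lvl_appendA_self]
  split_ifs with hm
  · exact hm
  · simp

theorem runA_post (g : List (String × List String)) :
    ∀ (f : Nat) (xs : List String) (d : Int) (b : PySem.Dict Int (List String)),
      ∀ s ∈ xs, s ∈ lvl (pvRunA g (f + 1) xs d b) (d + 1) ∧
        ClosedN g f s (d + 1) (pvRunA g (f + 1) xs d b) := by
  intro f
  induction f with
  | zero =>
    intro xs
    induction xs with
    | nil => intro d b s hs; cases hs
    | cons sub rest ih =>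
      intro d b s hs
      rw [runA_succ_cons, runA_zero]
      rw [List.mem_cons] at hs
      rcases hs with rfl | hs
      · exact ⟨grow_runA g _ _ _ _ _ _ (mem_self_appendA b (d + 1) s), trivial⟩
      · exact ih d _ s hs
  | succ f ihf =>
    intro xs
    induction xs with
    | nil => intro d b s hs; cases hs
    | cons sub rest ih =>
      intro d b s hs
      rw [runA_succ_cons]
      rw [List.mem_cons] at hs
      rcases hs with rfl | hs
      · constructor
        · exact grow_runA g _ _ _ _ _ _ (grow_runA g _ _ _ _ _ _ (mem_self_appendA b (d + 1) s))
        · apply ClosedN_mono g (f + 1) s (d + 1) _ _ (fun l y hy => grow_runA g _ _ _ _ _ _ hy)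
          intro t ht
          exact ihf (pvSuccs g s) (d + 1) (pvAppendA b (d + 1) s) t ht
      · exact ih d _ s hs

theorem runB_zero (g : List (String × List String)) (xs : List String) (d : Int) (st : PySem.Dict Int (List String) × PySem.Set (String × Int)) :
    pvRunB g 0 xs d st = st := by simp [pvRunB]

theorem runB_succ_nil (g : List (String × List String)) (f : Nat) (d : Int) (st : PySem.Dict Int (List String) × PySem.Set (String × Int)) :
    pvRunB g (f + 1) [] d st = st := by simp [pvRunB]

theorem runB_succ_cons (g : List (String × List String)) (f : Nat) (sub : String) (rest : List String) (d : Int) (b : PySem.Dict Int (List String)) (seen : PySem.Set (String × Int)) :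
    pvRunB g (f + 1) (sub :: rest) d (b, seen)
      = if (sub, d + 1) ∈ seen then
          pvRunB g (f + 1) rest d (b, seen)
        else
          pvRunB g (f + 1) rest d
            (pvRunB g f (pvSuccs g sub) (d + 1)
              (PySem.Dict.insert b (d + 1) (PySem.Dict.getD b (d + 1) [] ++ [sub]),
               PySem.Set.add seen (sub, d + 1))) := by
  rw [show pvRunB g (f + 1) (sub :: rest) d (b, seen)
      = if PySem.Set.contains seen (sub, d + 1) then pvRunB g (f + 1) rest d (b, seen)
        else pvRunB g (f + 1) rest d
          (pvRunB g f (pvSuccs g sub) (d + 1)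
            (PySem.Dict.insert b (d + 1) (PySem.Dict.getD b (d + 1) [] ++ [sub]),
             PySem.Set.add seen (sub, d + 1))) from by simp [pvRunB]]
  by_cases h : (sub, d + 1) ∈ seen
  · rw [if_pos ((PySem.Set.contains_iff seen _).mpr h), if_pos h]
  · rw [if_neg (fun hc => h ((PySem.Set.contains_iff seen _).mp hc)), if_neg h]

theorem seen_levels_runB (g : List (String × List String)) :
    ∀ (f : Nat) (xs : List String) (d : Int) (st : PySem.Dict Int (List String) × PySem.Set (String × Int))
      (y : String) (l : Int), l ≤ d →
      ((y, l) ∈ (pvRunB g f xs d st).2 ↔ (y, l) ∈ st.2) := by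
  intro f xs d st
  fun_induction pvRunB g f xs d st with
  | case1 => intro y l h; rfl
  | case2 => intro y l h; rfl
  | case3 f sub rest d st hc ih => intro y l h; exact ih y l h
  | case4 f sub rest d st hc ih1 ih2 =>
    intro y l h
    rw [ih2 y l h, ih1 y l (by omega)]
    simp only [PySem.Set.mem_add]
    constructor
    · rintro (h1 | h1)
      · exact h1
      · exfalso; injection h1 with h1 h2; omega
    · intro h1; exact Or.inl h1

theorem lvl_insert (b : PySem.Dict Int (List String)) (k l : Int) (v : List String) :
    lvl (PySem.Dict.insert b k v) l = if l = k then v else lvl b l := by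
  unfold lvl; simp [PySem.Dict.getD_insert]

theorem pv_main (g : List (String × List String)) :
    ∀ (f : Nat) (xs : List String) (d : Int) (b : PySem.Dict Int (List String)) (seen : PySem.Set (String × Int)),
      InvA g f d b seen →
      pvRunA g (f + 1) xs d b = (pvRunB g (f + 1) xs d (b, seen)).1 ∧
      InvA g f d (pvRunB g (f + 1) xs d (b, seen)).1 (pvRunB g (f + 1) xs d (b, seen)).2 := by
  intro f
  induction f using Nat.strong_induction_on with
  | h f IHf =>
  intro xs
  induction xs with
  | nil =>
    intro d b seen hInv
    rw [runA_succ_nil, runB_succ_nil]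
    exact ⟨rfl, hInv⟩
  | cons sub rest ih =>
    intro d b seen hInv
    rw [runA_succ_cons, runB_succ_cons]
    by_cases hseen : (sub, d + 1) ∈ seen
    · rw [if_pos hseen]
      have hdlt : d < d + 1 := by omega
      have hsub : sub ∈ lvl b (d + 1) := ((hInv (d + 1) hdlt sub).1).mp hseen
      have hclosed : ClosedN g f sub (d + 1) b := by
        have h := (hInv (d + 1) hdlt sub).2 hsub
        have : f - ((d + 1) - (d + 1)).toNat = f := by omega
        rwa [this] at h
      have hpush : pvAppendA b (d + 1) sub = b := by
        unfold pvAppendA; unfold lvl at hsub; simp [hsub]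
      have hinner : pvRunA g f (pvSuccs g sub) (d + 1) b = b := by
        cases f with
        | zero => exact runA_zero g _ _ _
        | succ f' => exact runA_nop g f' _ _ _ (fun s hs => hclosed s hs)
      rw [hpush, hinner]
      exact ih d b seen hInv
    · rw [if_neg hseen]
      have hdlt : d < d + 1 := by omega
      have hnot : sub ∉ lvl b (d + 1) := fun h => hseen (((hInv (d + 1) hdlt sub).1).mpr h)
      have hpush : pvAppendA b (d + 1) sub
          = PySem.Dict.insert b (d + 1) (PySem.Dict.getD b (d + 1) [] ++ [sub]) := by
        unfold pvAppendA; unfold lvl at hnot; simp [hnot]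
      set b' := PySem.Dict.insert b (d + 1) (PySem.Dict.getD b (d + 1) [] ++ [sub]) with hb'
      set seen' := PySem.Set.add seen (sub, d + 1) with hseen'
      have hlvlb' : ∀ l : Int, lvl b' l = if l = d + 1 then lvl b (d + 1) ++ [sub] else lvl b l := by
        intro l; rw [hb', lvl_insert]; rfl
      have hgrow_b' : ∀ (l : Int) (y : String), y ∈ lvl b l → y ∈ lvl b' l := by
        intro l y hy; rw [hlvlb']; split_ifs with h
        · subst h; exact List.mem_append_left _ hy
        · exact hy
      have hmem_seen' : ∀ (p : String × Int), p ∈ seen' ↔ p ∈ seen ∨ p = (sub, d + 1) := by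
        intro p; rw [hseen', PySem.Set.mem_add]
      -- the inner call
      cases f with
      | zero =>
        rw [hpush, runA_zero, runB_zero]
        apply ih
        intro l hl y
        constructor
        · rw [hmem_seen', hlvlb']
          by_cases h : l = d + 1
          · subst h
            rw [if_pos rfl]
            have := (hInv (d + 1) hdlt y).1
            simp only [List.mem_append, List.mem_singleton, Prod.mk.injEq]
            constructor
            · rintro (h1 | ⟨h1, -⟩)
              · exact Or.inl (this.mp h1)
              · exact Or.inr (by simp [h1])
            · rintro (h1 | h1)
              · exact Or.inl (this.mpr h1)
              · exact Or.inr ⟨h1, trivial⟩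
          · rw [if_neg h]
            have := (hInv l hl y).1
            constructor
            · rintro (h1 | h1)
              · exact this.mp h1
              · exfalso; injection h1 with h1 h2; omega
            · intro h1; exact Or.inl (this.mpr h1)
        · intro hy
          have : (0 : Nat) - (l - (d + 1)).toNat = 0 := by omega
          rw [this]
          trivial
      | succ f' =>
        have hInv' : InvA g f' (d + 1) b' seen' := by
          intro l hl y
          have hl' : d < l := by omega
          have hld : l ≠ d + 1 := by omega
          have hlvl : lvl b' l = lvl b l := by rw [hlvlb', if_neg hld]
          constructor
          · rw [hmem_seen', hlvl]
            have := (hInv l hl' y).1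
            constructor
            · rintro (h1 | h1)
              · exact this.mp h1
              · exfalso; injection h1 with h1 h2; omega
            · intro h1; exact Or.inl (this.mpr h1)
          · rw [hlvl]
            intro hy
            have h := (hInv l hl' y).2 hy
            have heq : f' - (l - (d + 1 + 1)).toNat = f' + 1 - (l - (d + 1)).toNat := by omega
            rw [heq]
            exact ClosedN_mono g _ y l b b' hgrow_b' h
        have Hm := IHf f' (by omega) (pvSuccs g sub) (d + 1) b' seen' hInv'
        rw [hpush, Hm.1]
        set st1 := pvRunB g (f' + 1) (pvSuccs g sub) (d + 1) (b', seen') with hst1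
        have hB1 : st1.1 = pvRunA g (f' + 1) (pvSuccs g sub) (d + 1) b' := Hm.1.symm
        -- show pvRunB g (f'+1) rest d st1 matches: st1 as pair
        have hpair : st1 = (st1.1, st1.2) := rfl
        rw [hpair]
        apply ih
        -- InvA g (f'+1) d st1.1 st1.2
        intro l hl y
        by_cases h : l = d + 1
        · subst h
          have hlvl1 : lvl st1.1 (d + 1) = lvl b (d + 1) ++ [sub] := by
            rw [hB1, levels_runA g _ _ _ _ _ (by omega), hlvlb', if_pos rfl]
          have hseen1 : ∀ p : String × Int, p.2 = d + 1 → (p ∈ st1.2 ↔ p ∈ seen') := by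
            intro p hp
            have := seen_levels_runB g (f' + 1) (pvSuccs g sub) (d + 1) (b', seen') p.1 p.2 (by omega)
            simpa using this
          constructor
          · rw [hseen1 (y, d + 1) rfl, hmem_seen', hlvl1]
            have := (hInv (d + 1) hdlt y).1
            simp only [List.mem_append, List.mem_singleton, Prod.mk.injEq]
            constructor
            · rintro (h1 | ⟨h1, -⟩)
              · exact Or.inl (this.mp h1)
              · exact Or.inr (by simp [h1])
            · rintro (h1 | h1)
              · exact Or.inl (this.mpr h1)
              · exact Or.inr ⟨h1, trivial⟩
          · rw [hlvl1]
            intro hy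
            have hfe : f' + 1 - ((d + 1) - (d + 1)).toNat = f' + 1 := by omega
            rw [hfe]
            rcases List.mem_append.mp hy with hy | hy
            · -- old entry: closed in b at fuel f'+1, mono to st1.1
              have h := (hInv (d + 1) hdlt y).2 (hy)
              have : f' + 1 - ((d + 1) - (d + 1)).toNat = f' + 1 := by omega
              rw [this] at h
              apply ClosedN_mono g _ y (d + 1) b st1.1 _ h
              intro l2 y2 hy2
              rw [hB1]
              exact grow_runA g _ _ _ _ _ _ (hgrow_b' _ _ hy2)
            · -- y = sub
              simp at hy; subst hy
              intro t ht
              rw [hB1]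
              exact runA_post g f' (pvSuccs g y) (d + 1) b' t ht
        · have hl2 : d + 1 < l := by omega
          have H2 := Hm.2 l hl2 y
          constructor
          · exact H2.1
          · intro hy
            have h := H2.2 hy
            have heq : f' - (l - (d + 1 + 1)).toNat = f' + 1 - (l - (d + 1)).toNat := by omega
            rwa [heq] at h

-- ===== VERDICT (by name: the statement is the Claim_ definition above) =====
theorem get_breadths_spec : Claim_equal_get_breadths := by
  unfold Claim_equal_get_breadths
  intro node graph depth breadths hDom hPre
  unfold Spec_get_breadths get_breadths get_breadths_alt
  cases breadths with
  | none =>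
    have hInv0 : InvA graph graph.length depth (PySem.Dict.insert PySem.Dict.empty depth [node]) PySem.Set.empty := by
      intro l hl y
      have hlvl : lvl (PySem.Dict.insert PySem.Dict.empty depth [node]) l = [] := by
        rw [lvl_insert, if_neg (by omega)]
        unfold lvl; simp [PySem.Dict.getD_empty]
      rw [hlvl]
      constructor
      · constructor
        · intro h; cases h
        · intro h; cases h
      · intro h; cases h
    have H := pv_main graph graph.length (pvSuccs graph node) depth
      (PySem.Dict.insert PySem.Dict.empty depth [node]) PySem.Set.empty hInv0
    rw [H.1]
  | some b =>
    rcases hPre.1 with h | h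
    · cases h
    · dsimp only
      rw [h, runA_succ_nil, runB_succ_nil]
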